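-- pv_equiv track=rewrite | github.com/Gregory-Hu/Jackal | agent/core/atomic_skill.py | _analyze_quality
-- ===== SOURCE A (Python) =====
-- def _analyze_quality(file_path: str, content: str) -> str:
--     lines = content.splitlines()
--
--     issues = []
--
--     # 检查长函数
--     in_function = False
--     function_start = 0
--     function_name = ""
--
--     for i, line in enumerate(lines, 1):
--         if line.strip().startswith('def '):
--             if in_function and i - function_start > 50:
--                 issues.append(f"函数过长：{function_name} ({i - function_start}行)")
--             in_function = True
--             function_start = i
--             function_name = line.strip()
--
--     # 检查空注释
--     for i, line in enumerate(lines, 1):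
--         if '# TODO' in line or '# FIXME' in line:
--             issues.append(f"待处理项：行{i} - {line.strip()}")
--
--     result = [f"代码质量分析：{file_path}"]
--     if issues:
--         result.append(f"\n发现 {len(issues)} 个问题:")
--         for issue in issues[:10]:
--             result.append(f"  - {issue}")
--     else:
--         result.append("\n未发现明显问题")
--
--     return '\n'.join(result)
-- ===== SOURCE B (Python) =====
-- def _analyze_quality(file_path: str, content: str) -> str:
--     lines = content.splitlines()
--
--     # Single bottom-up pass: walk the file in reverse carrying the nearest
--     # following def line, prepending issues so both groups come out in order.
--     next_def = None
--     long_issues = []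
--     todo_issues = []
--     for i in range(len(lines), 0, -1):
--         line = lines[i - 1]
--         stripped = line.strip()
--         if '# TODO' in line or '# FIXME' in line:
--             todo_issues = [f"待处理项：行{i} - {stripped}"] + todo_issues
--         if stripped.startswith('def '):
--             if next_def is not None and next_def - i > 50:
--                 long_issues = [f"函数过长：{stripped} ({next_def - i}行)"] + long_issues
--             next_def = i
--
--     issues = long_issues + todo_issues
--
--     result = [f"代码质量分析：{file_path}"]
--     if issues:
--         result.append(f"\n发现 {len(issues)} 个问题:")
--         for issue in issues[:10]:
--             result.append(f"  - {issue}")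
--     else:
--         result.append("\n未发现明显问题")
--
--     return '\n'.join(result)
-- ===== Notes on version B (the rewrite author's own statement) =====
-- stated objective: alternative
-- what changed: B makes a single bottom-up pass over the lines carrying the nearest FOLLOWING def line and prepending issues into two groups, instead of A's two separate top-down passes with a previous-def state machine (in_function/function_start/function_name).
import Mathlib
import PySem

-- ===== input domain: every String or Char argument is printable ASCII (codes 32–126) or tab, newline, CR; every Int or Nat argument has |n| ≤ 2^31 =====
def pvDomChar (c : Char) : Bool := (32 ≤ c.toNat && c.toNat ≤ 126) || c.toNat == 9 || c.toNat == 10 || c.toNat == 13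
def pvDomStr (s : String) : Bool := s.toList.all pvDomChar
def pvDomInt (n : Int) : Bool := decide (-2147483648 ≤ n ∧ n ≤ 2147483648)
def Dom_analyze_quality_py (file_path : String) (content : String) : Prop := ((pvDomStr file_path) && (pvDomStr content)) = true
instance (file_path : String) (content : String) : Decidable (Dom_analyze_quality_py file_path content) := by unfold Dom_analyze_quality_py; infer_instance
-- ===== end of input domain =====

-- B replaces A's two top-down passes with a previous-def state machine by ONE bottom-up
-- pass carrying the nearest following def line ('alternative', same cost, same output).

-- ===== PORT A =====
-- f-string helpers (identical f-strings appear in both Pythons)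
def pvMsgLong (fn : String) (d : Int) : String :=
  "函数过长：" ++ fn ++ " (" ++ PySem.Int.toStr d ++ "行)"
def pvMsgTodo (i : Int) (t : String) : String :=
  "待处理项：行" ++ PySem.Int.toStr i ++ " - " ++ t
-- line.strip().startswith('def ')  /  '# TODO' in line or '# FIXME' in line
def pvIsDef (l : String) : Bool := PySem.Str.startswith (PySem.Str.strip l) "def "
def pvIsTodo (l : String) : Bool := PySem.Str.isIn "# TODO" l || PySem.Str.isIn "# FIXME" l

-- A's first for-loop: state (in_function, function_start, function_name), 1-based index i
def pvLoopDefsA : List String → Int → Bool → Int → String → List String → List String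
  | [], _, _, _, _, issues => issues
  | line :: rest, i, inf, fs, fn, issues =>
    if pvIsDef line then
      pvLoopDefsA rest (i + 1) true i (PySem.Str.strip line)
        (if inf && decide (i - fs > 50) then issues ++ [pvMsgLong fn (i - fs)] else issues)
    else pvLoopDefsA rest (i + 1) inf fs fn issues

-- A's second for-loop
def pvLoopTodoA : List String → Int → List String → List String
  | [], _, issues => issues
  | line :: rest, i, issues =>
    pvLoopTodoA rest (i + 1)
      (if pvIsTodo line then issues ++ [pvMsgTodo i (PySem.Str.strip line)] else issues)

def analyze_quality_py (file_path : String) (content : String) : String :=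
  let lines := PySem.Str.splitlines content
  let issues := pvLoopTodoA lines 1 (pvLoopDefsA lines 1 false 0 "" [])
  let result :=
    if issues ≠ [] then
      (PySem.List.slice issues none (some 10)).foldl
        (fun r issue => r ++ ["  - " ++ issue])
        (["代码质量分析：" ++ file_path] ++ ["\n发现 " ++ PySem.Int.toStr (issues.length : Int) ++ " 个问题:"])
    else ["代码质量分析：" ++ file_path] ++ ["\n未发现明显问题"]
  PySem.Str.join "\n" result

-- ===== PORT B =====
-- one iteration of B's bottom-up loop; state = (next_def, long_issues, todo_issues)
def pvStepB (i : Int) (line : String) (st : Option Int × List String × List String) :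
    Option Int × List String × List String :=
  let todos := if pvIsTodo line then pvMsgTodo i (PySem.Str.strip line) :: st.2.2 else st.2.2
  if pvIsDef line then
    let longs :=
      match st.1 with
      | some j => if j - i > 50 then pvMsgLong (PySem.Str.strip line) (j - i) :: st.2.1 else st.2.1
      | none => st.2.1
    (some i, longs, todos)
  else (st.1, st.2.1, todos)

-- 'for i in range(len(lines), 0, -1): line = lines[i-1]; …' = walk lines.reverse, i counting down
def pvScanB : List String → Int → (Option Int × List String × List String) →
    (Option Int × List String × List String)
  | [], _, st => st
  | line :: rest, i, st => pvScanB rest (i - 1) (pvStepB i line st)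

def analyze_quality_py_alt (file_path : String) (content : String) : String :=
  let lines := PySem.Str.splitlines content
  let st := pvScanB lines.reverse (lines.length : Int) (none, [], [])
  let issues := st.2.1 ++ st.2.2
  let result :=
    if issues ≠ [] then
      (PySem.List.slice issues none (some 10)).foldl
        (fun r issue => r ++ ["  - " ++ issue])
        (["代码质量分析：" ++ file_path] ++ ["\n发现 " ++ PySem.Int.toStr (issues.length : Int) ++ " 个问题:"])
    else ["代码质量分析：" ++ file_path] ++ ["\n未发现明显问题"]
  PySem.Str.join "\n" result

-- ===== PRECONDITION & SPEC =====
def Spec_analyze_quality_py (file_path : String) (content : String) (out : String) : Prop := out = analyze_quality_py_alt file_path content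
instance (file_path : String) (content : String) (out : String) : Decidable (Spec_analyze_quality_py file_path content out) := by unfold Spec_analyze_quality_py; infer_instance

-- ===== CLAIM =====
def Claim_equal_analyze_quality_py : Prop := ∀ (file_path : String) (content : String), Dom_analyze_quality_py file_path content → Spec_analyze_quality_py file_path content (analyze_quality_py file_path content)

-- ===== LEMMAS AND PROOFS =====

-- proof-only normal forms, parametric in the 1-based start number s
def pvTodoFrom (lines : List String) (s : Int) : List String :=
  (PySem.List.enumerate lines s).filterMap
    (fun p => if pvIsTodo p.2 then some (pvMsgTodo p.1 (PySem.Str.strip p.2)) else none)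

def pvDefsFrom (lines : List String) (s : Int) : List (Int × String) :=
  (PySem.List.enumerate lines s).filterMap
    (fun p => if pvIsDef p.2 then some (p.1, PySem.Str.strip p.2) else none)

-- long-function issues of an indexed def list: consecutive pairs with gap > 50
def pvLongB : List (Int × String) → List String
  | a :: b :: ds => (if b.1 - a.1 > 50 then [pvMsgLong a.2 (b.1 - a.1)] else []) ++ pvLongB (b :: ds)
  | _ => []

theorem pvLongB_cons_cons (a b : Int × String) (ds : List (Int × String)) :
    pvLongB (a :: b :: ds) =
      (if b.1 - a.1 > 50 then [pvMsgLong a.2 (b.1 - a.1)] else []) ++ pvLongB (b :: ds) := rfl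

theorem pvLoopTodoA_eq (lines : List String) : ∀ (i : Int) (issues : List String),
    pvLoopTodoA lines i issues = issues ++ pvTodoFrom lines i := by
  induction lines with
  | nil => intro i issues; simp [pvLoopTodoA, pvTodoFrom, PySem.List.enumerate_nil]
  | cons line rest ih =>
    intro i issues
    simp only [pvLoopTodoA, pvTodoFrom, PySem.List.enumerate_cons, List.filterMap_cons]
    rw [ih]
    split_ifs <;> simp [pvTodoFrom, List.append_assoc]

theorem pvLoopDefsA_eq (lines : List String) : ∀ (i fs : Int) (inf : Bool) (fn : String)
    (issues : List String),
    pvLoopDefsA lines i inf fs fn issues =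
      issues ++ pvLongB ((if inf then [(fs, fn)] else []) ++ pvDefsFrom lines i) := by
  induction lines with
  | nil =>
    intro i fs inf fn issues
    cases inf <;> simp [pvLoopDefsA, pvDefsFrom, pvLongB, PySem.List.enumerate_nil]
  | cons line rest ih =>
    intro i fs inf fn issues
    simp only [pvLoopDefsA, pvDefsFrom, PySem.List.enumerate_cons, List.filterMap_cons]
    by_cases hd : pvIsDef line
    · simp only [hd, if_pos]
      rw [ih]
      cases inf with
      | false => simp [pvDefsFrom]
      | true =>
        simp only [Bool.true_and, List.cons_append, List.nil_append, if_true]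
        rw [pvLongB_cons_cons]
        by_cases hgt : i - fs > 50
        · simp [hgt, List.append_assoc, pvDefsFrom]
        · simp [hgt, pvDefsFrom]
    · simp only [hd, if_neg, Bool.false_eq_true, not_false_iff]
      rw [ih]
      simp [pvDefsFrom]

-- processing a final element: one step at index i - l.length after the rest of the walk
theorem pvScanB_append (l : List String) (x : String) : ∀ (i : Int) (st : _),
    pvScanB (l ++ [x]) i st = pvStepB (i - l.length) x (pvScanB l i st) := by
  induction l with
  | nil => intro i st; simp [pvScanB]
  | cons y l ih =>
    intro i st
    simp only [List.cons_append, pvScanB, ih]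
    congr 1
    simp only [List.length_cons]
    push_cast
    ring

-- characterization of B's scan from the end of the file
theorem pvScanB_spec (lines : List String) : ∀ (s : Int),
    pvScanB lines.reverse (s + lines.length - 1) (none, [], []) =
      ((pvDefsFrom lines s).head?.map Prod.fst, pvLongB (pvDefsFrom lines s),
        pvTodoFrom lines s) := by
  induction lines with
  | nil => intro s; simp [pvScanB, pvDefsFrom, pvTodoFrom, pvLongB, PySem.List.enumerate_nil]
  | cons line rest ih =>
    intro s
    have hlen : (s + ((line :: rest).length : Int) - 1) = ((s + 1) + rest.length - 1) := by
      simp only [List.length_cons]; push_cast; ring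
    rw [List.reverse_cons, hlen, pvScanB_append, ih (s + 1)]
    have hidx : ((s + 1) + (rest.length : Int) - 1) - (rest.reverse.length : Int) = s := by
      simp only [List.length_reverse]; omega
    rw [hidx]
    simp only [pvDefsFrom, pvTodoFrom, PySem.List.enumerate_cons, List.filterMap_cons]
    by_cases hd : pvIsDef line
    · simp only [hd, if_true]
      cases h : List.filterMap
          (fun p => if pvIsDef p.2 = true then some (p.1, PySem.Str.strip p.2) else none)
          (PySem.List.enumerate rest (s + 1)) with
      | nil => by_cases ht : pvIsTodo line <;> simp [pvStepB, pvLongB, hd, ht]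
      | cons b ds =>
        rw [pvLongB_cons_cons]
        by_cases hgt : b.1 - s > 50 <;> by_cases ht : pvIsTodo line <;>
          simp [pvStepB, hd, hgt, ht]
    · by_cases ht : pvIsTodo line <;> simp [pvStepB, hd, ht]

-- ===== VERDICT =====
theorem analyze_quality_py_spec : Claim_equal_analyze_quality_py := by
  unfold Claim_equal_analyze_quality_py
  intro file_path content _
  unfold Spec_analyze_quality_py analyze_quality_py analyze_quality_py_alt
  have key : ∀ lines : List String,
      pvScanB lines.reverse (lines.length : Int) (none, [], []) =
        ((pvDefsFrom lines 1).head?.map Prod.fst, pvLongB (pvDefsFrom lines 1),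
          pvTodoFrom lines 1) := by
    intro lines
    have h := pvScanB_spec lines 1
    have h1 : (1 + (lines.length : Int) - 1) = (lines.length : Int) := by omega
    rwa [h1] at h
  simp only [key, pvLoopDefsA_eq, pvLoopTodoA_eq]
  simp
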